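-- pv_equiv track=rewrite | github.com/suyoumo/OpenClawProBench | harness/loader.py | _infer_openclaw_surfaces
-- ===== SOURCE A (Python) =====
-- from typing import Any
--
-- OPENCLAW_SURFACE_PREFIXES: tuple[tuple[str, str], ...] = (
--     ("calendar_", "calendar"),
--     ("gmail_", "gmail"),
--     ("contacts_", "contacts"),
--     ("message_", "message"),
--     ("directory_", "directory"),
--     ("memory_", "memory"),
--     ("browser_", "browser"),
--     ("feishu_", "feishu"),
--     ("task_", "task"),
--     ("bitable_", "bitable"),
--     ("wiki_", "wiki"),
--     ("sheet_", "sheet"),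
--     ("im_", "im"),
-- )
--
-- def _infer_openclaw_surfaces(raw_tools: list[Any] | None, raw_surfaces: list[Any] | None) -> list[str]:
--     explicit = [str(surface).strip() for surface in (raw_surfaces or []) if str(surface).strip()]
--     if explicit:
--         return explicit
--
--     inferred: list[str] = []
--     for raw_tool in raw_tools or []:
--         tool = str(raw_tool).strip()
--         for prefix, surface in OPENCLAW_SURFACE_PREFIXES:
--             if tool.startswith(prefix) and surface not in inferred:
--                 inferred.append(surface)
--     return inferred
-- ===== SOURCE B (Python) =====
-- from typing import Any
--
-- OPENCLAW_SURFACE_PREFIXES: tuple[tuple[str, str], ...] = (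
--     ("calendar_", "calendar"),
--     ("gmail_", "gmail"),
--     ("contacts_", "contacts"),
--     ("message_", "message"),
--     ("directory_", "directory"),
--     ("memory_", "memory"),
--     ("browser_", "browser"),
--     ("feishu_", "feishu"),
--     ("task_", "task"),
--     ("bitable_", "bitable"),
--     ("wiki_", "wiki"),
--     ("sheet_", "sheet"),
--     ("im_", "im"),
-- )
--
-- # Every prefix is exactly its surface followed by "_", so a tool matches a prefix
-- # iff the token before its first underscore IS a known surface name.
-- _SURFACES = frozenset(surface for _, surface in OPENCLAW_SURFACE_PREFIXES)
--
--
-- def _infer_openclaw_surfaces(raw_tools, raw_surfaces):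
--     explicit = [t for s in (raw_surfaces or []) if (t := str(s).strip())]
--     if explicit:
--         return explicit
--
--     heads = (str(t).strip().split("_", 1)[0] for t in raw_tools or []
--              if "_" in str(t).strip())
--     return list(dict.fromkeys(h for h in heads if h in _SURFACES))
-- ===== Notes on version B (the rewrite author's own statement) =====
-- stated objective: idiomatic
-- what changed: Exploits that every prefix is its surface plus '_': instead of A's single pass that scans all 13 prefixes per tool and tests membership in the growing result, B stages the work as comprehensions - extract each tool's leading token before the first underscore, keep it if it is a known surface (set membership), then dedup once with dict.fromkeys preserving first-occurrence order.
import Mathlib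
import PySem

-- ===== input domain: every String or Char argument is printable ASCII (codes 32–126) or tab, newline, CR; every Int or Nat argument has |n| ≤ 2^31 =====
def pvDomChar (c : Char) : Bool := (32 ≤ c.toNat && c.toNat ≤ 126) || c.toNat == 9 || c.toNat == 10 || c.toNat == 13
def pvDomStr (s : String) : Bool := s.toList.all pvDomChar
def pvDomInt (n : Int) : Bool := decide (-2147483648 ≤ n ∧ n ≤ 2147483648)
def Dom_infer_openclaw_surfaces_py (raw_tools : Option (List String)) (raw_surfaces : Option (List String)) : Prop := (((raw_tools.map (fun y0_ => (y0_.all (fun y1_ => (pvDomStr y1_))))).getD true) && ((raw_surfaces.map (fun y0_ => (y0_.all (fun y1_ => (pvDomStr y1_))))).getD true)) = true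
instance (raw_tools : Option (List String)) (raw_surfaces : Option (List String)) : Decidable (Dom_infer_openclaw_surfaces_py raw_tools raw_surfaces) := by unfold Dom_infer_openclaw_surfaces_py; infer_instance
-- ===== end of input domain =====

-- B exploits that every prefix is its surface plus '_': it extracts each tool's leading token,
-- keeps it if it is a known surface (set membership), and dedups once at the end (idiomatic).

-- ===== PORT A =====
def pvPrefixesA : List (String × String) :=
  [("calendar_", "calendar"), ("gmail_", "gmail"), ("contacts_", "contacts"),
   ("message_", "message"), ("directory_", "directory"), ("memory_", "memory"),
   ("browser_", "browser"), ("feishu_", "feishu"), ("task_", "task"),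
   ("bitable_", "bitable"), ("wiki_", "wiki"), ("sheet_", "sheet"), ("im_", "im")]

def infer_openclaw_surfaces_py (raw_tools : Option (List String)) (raw_surfaces : Option (List String)) : List String :=
  let explicit := ((raw_surfaces.getD []).map (fun s => PySem.Str.strip s)).filter (fun t => t ≠ "")
  if explicit ≠ [] then explicit
  else
    (raw_tools.getD []).foldl (fun inferred raw_tool =>
      let tool := PySem.Str.strip raw_tool
      pvPrefixesA.foldl (fun inf ps =>
        if PySem.Str.startswith tool ps.1 = true ∧ ps.2 ∉ inf then inf ++ [ps.2] else inf) inferred) []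

-- ===== PORT B =====
-- _SURFACES = frozenset(surface for _, surface in OPENCLAW_SURFACE_PREFIXES)
def pvSurfaces : PySem.Set String :=
  PySem.Set.ofList ["calendar", "gmail", "contacts", "message", "directory", "memory",
                    "browser", "feishu", "task", "bitable", "wiki", "sheet", "im"]

-- heads generator: tool.split('_', 1)[0] (= the chars before the first '_'; exact, since the
-- split is guarded by '_' being present) for each stripped tool containing '_'
def pvHeads (tools : List String) : List String :=
  tools.filterMap (fun t =>
    let cs := (PySem.Str.strip t).toList
    if cs.contains '_' then some (String.ofList (cs.takeWhile (fun c => c ≠ '_'))) else none)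

def infer_openclaw_surfaces_py_alt (raw_tools : Option (List String)) (raw_surfaces : Option (List String)) : List String :=
  let explicit := (raw_surfaces.getD []).filterMap (fun s =>
    let t := PySem.Str.strip s; if t = "" then none else some t)
  if explicit = [] then
    -- list(dict.fromkeys(h for h in heads if h in _SURFACES))
    PySem.List.dedup ((pvHeads (raw_tools.getD [])).filter (fun h => PySem.Set.contains pvSurfaces h))
  else explicit

-- ===== PRECONDITION & SPEC =====
def Spec_infer_openclaw_surfaces_py (raw_tools : Option (List String)) (raw_surfaces : Option (List String)) (out : List String) : Prop := out = infer_openclaw_surfaces_py_alt raw_tools raw_surfaces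
instance (raw_tools : Option (List String)) (raw_surfaces : Option (List String)) (out : List String) : Decidable (Spec_infer_openclaw_surfaces_py raw_tools raw_surfaces out) := by unfold Spec_infer_openclaw_surfaces_py; infer_instance

-- ===== CLAIM (what is proved, stated in full; the proofs are below) =====
def Claim_equal_infer_openclaw_surfaces_py : Prop := ∀ (raw_tools : Option (List String)) (raw_surfaces : Option (List String)), Dom_infer_openclaw_surfaces_py raw_tools raw_surfaces → Spec_infer_openclaw_surfaces_py raw_tools raw_surfaces (infer_openclaw_surfaces_py raw_tools raw_surfaces)

-- ===== LEMMAS AND PROOFS =====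

-- the explicit-surfaces pass: A's map-then-filter equals B's filterMap
theorem pv_explicit_eq (l : List String) :
    (l.map (fun s => PySem.Str.strip s)).filter (fun t => t ≠ "")
      = l.filterMap (fun s => let t := PySem.Str.strip s; if t = "" then none else some t) := by
  induction l with
  | nil => rfl
  | cons s l ih =>
    simp only [List.map_cons, List.filter_cons, List.filterMap_cons]
    by_cases h : PySem.Str.strip s = ""
    · simpa [h] using ih
    · simpa [h] using ih

-- startswith (p ++ "_") holds iff '_' occurs in cs and the leading token of cs equals p
theorem pv_sw_iff (p cs : List Char) (hp : '_' ∉ p) :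
    PySem.Chars.startswith cs (p ++ ['_']) = true ↔
      ('_' ∈ cs ∧ cs.takeWhile (fun c => decide (c ≠ '_')) = p) := by
  rw [PySem.Chars.startswith_iff]
  constructor
  · rintro ⟨rest, hrest⟩
    subst hrest
    refine ⟨by simp, ?_⟩
    have hall : List.takeWhile (fun c => decide (c ≠ '_')) p = p := by
      rw [List.takeWhile_eq_self_iff]
      intro c hc
      simp only [decide_eq_true_eq]
      intro h; exact hp (h ▸ hc)
    rw [List.append_assoc, List.takeWhile_append, hall, if_pos rfl]
    simp
  · rintro ⟨hmem, htok⟩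
    have hsplit := List.takeWhile_append_dropWhile (p := fun c => decide (c ≠ '_')) (l := cs)
    have hdne : cs.dropWhile (fun c => decide (c ≠ '_')) ≠ [] := by
      intro h
      rw [← hsplit, h, List.append_nil] at hmem
      have := List.mem_takeWhile_imp hmem
      simp at this
    have hhead : (cs.dropWhile (fun c => decide (c ≠ '_'))).head hdne = '_' := by
      have := List.head_dropWhile_not (p := fun c => decide (c ≠ '_')) (l := cs) hdne
      simp only [decide_eq_false_iff_not, not_not] at this
      exact this
    have hd : cs.dropWhile (fun c => decide (c ≠ '_'))
        = '_' :: (cs.dropWhile (fun c => decide (c ≠ '_'))).tail := by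
      conv_lhs => rw [← List.cons_head_tail hdne]
      rw [hhead]
    refine ⟨(cs.dropWhile (fun c => decide (c ≠ '_'))).tail, ?_⟩
    have hmid : p ++ ['_'] ++ (cs.dropWhile (fun c => decide (c ≠ '_'))).tail
        = cs.takeWhile (fun c => decide (c ≠ '_')) ++ cs.dropWhile (fun c => decide (c ≠ '_')) := by
      rw [htok]
      conv_rhs => rw [hd]
      simp
    exact hmid.trans hsplit

-- A's inner scan over underscore-terminated prefixes of distinct underscore-free surfaces
-- equals one membership test of the leading token followed by a Set.add
theorem pv_fold_surfs (cs : List Char) (ss : List String) (acc : List String)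
    (hund : ∀ s ∈ ss, '_' ∉ s.toList) (hnd : ss.Nodup) :
    (ss.map (fun s => (s.toList ++ ['_'], s))).foldl
        (fun inf q => if PySem.Chars.startswith cs q.1 = true ∧ q.2 ∉ inf then inf ++ [q.2] else inf) acc
    = if '_' ∈ cs ∧ String.ofList (cs.takeWhile (fun c => decide (c ≠ '_'))) ∈ ss then
        PySem.Set.add acc (String.ofList (cs.takeWhile (fun c => decide (c ≠ '_'))))
      else acc := by
  induction ss generalizing acc with
  | nil => simp
  | cons s ss ih =>
    have hs : '_' ∉ s.toList := hund s (by simp)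
    have hss : ∀ x ∈ ss, '_' ∉ x.toList := fun x hx => hund x (List.mem_cons_of_mem _ hx)
    simp only [List.nodup_cons] at hnd
    simp only [List.map_cons, List.foldl_cons]
    by_cases htk : cs.takeWhile (fun c => decide (c ≠ '_')) = s.toList
    · have hhd : String.ofList (cs.takeWhile (fun c => decide (c ≠ '_'))) = s := by
        rw [htk]; exact String.ofList_toList
      by_cases hu : '_' ∈ cs
      · have hnotss : String.ofList (cs.takeWhile (fun c => decide (c ≠ '_'))) ∉ ss := by
          rw [hhd]; exact hnd.1
        by_cases hmem : s ∈ acc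
        · rw [if_neg (by rw [pv_sw_iff s.toList cs hs]; tauto)]
          rw [ih acc hss hnd.2, if_neg (by tauto)]
          rw [if_pos ⟨hu, by rw [hhd]; exact List.mem_cons_self⟩, hhd]
          simp [PySem.Set.add, PySem.Set.contains, hmem]
        · rw [if_pos ⟨(pv_sw_iff s.toList cs hs).mpr ⟨hu, htk⟩, hmem⟩]
          rw [ih (acc ++ [s]) hss hnd.2, if_neg (by tauto)]
          rw [if_pos ⟨hu, by rw [hhd]; exact List.mem_cons_self⟩, hhd]
          simp [PySem.Set.add, PySem.Set.contains, hmem]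
      · rw [if_neg (by rw [pv_sw_iff s.toList cs hs]; tauto)]
        rw [ih acc hss hnd.2, if_neg (by tauto), if_neg (by tauto)]
    · have hne : String.ofList (cs.takeWhile (fun c => decide (c ≠ '_'))) ≠ s := by
        intro h
        exact htk (by rw [← h, String.toList_ofList])
      rw [if_neg (by rw [pv_sw_iff s.toList cs hs]; tauto)]
      rw [ih acc hss hnd.2]
      by_cases hc : '_' ∈ cs ∧ String.ofList (cs.takeWhile (fun c => decide (c ≠ '_'))) ∈ ss
      · rw [if_pos hc, if_pos ⟨hc.1, List.mem_cons_of_mem _ hc.2⟩]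
      · rw [if_neg hc, if_neg (by simp only [List.mem_cons]; tauto)]

-- the surface names, in prefix-table order
def pvSurfNames : List String :=
  ["calendar", "gmail", "contacts", "message", "directory", "memory",
   "browser", "feishu", "task", "bitable", "wiki", "sheet", "im"]

-- B's per-tool option: the leading token when '_' is present and it names a surface
def pvPick (t : String) : Option String :=
  let cs := (PySem.Str.strip t).toList
  if '_' ∈ cs ∧ String.ofList (cs.takeWhile (fun c => decide (c ≠ '_'))) ∈ pvSurfNames then
    some (String.ofList (cs.takeWhile (fun c => decide (c ≠ '_'))))
  else none

-- the per-tool step of A is a conditional Set.add of the picked surface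
theorem pv_step_eq (t : String) (acc : List String) :
    pvPrefixesA.foldl (fun inf ps =>
        if PySem.Str.startswith (PySem.Str.strip t) ps.1 = true ∧ ps.2 ∉ inf then inf ++ [ps.2] else inf) acc
    = match pvPick t with
      | some h => PySem.Set.add acc h
      | none => acc := by
  have h1 : pvPrefixesA.map (fun ps => (ps.1.toList, ps.2))
      = pvSurfNames.map (fun s => (s.toList ++ ['_'], s)) := by decide
  have h2 : pvPrefixesA.foldl (fun inf ps =>
        if PySem.Str.startswith (PySem.Str.strip t) ps.1 = true ∧ ps.2 ∉ inf then inf ++ [ps.2] else inf) acc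
      = (pvPrefixesA.map (fun ps => (ps.1.toList, ps.2))).foldl
          (fun inf q => if PySem.Chars.startswith (PySem.Str.strip t).toList q.1 = true ∧ q.2 ∉ inf then inf ++ [q.2] else inf) acc := by
    rw [List.foldl_map]
    simp only [PySem.Str.startswith_eq]
    rfl
  rw [h2, h1, pv_fold_surfs ((PySem.Str.strip t).toList) pvSurfNames acc (by decide) (by decide),
    pvPick]
  by_cases hc : '_' ∈ (PySem.Str.strip t).toList ∧
      String.ofList (((PySem.Str.strip t).toList).takeWhile (fun c => decide (c ≠ '_'))) ∈ pvSurfNames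
  · rw [if_pos hc]; simp only [if_pos hc]
  · rw [if_neg hc]; simp only [if_neg hc]

-- Set membership in the literal surface set is list membership in pvSurfNames
theorem pv_contains_eq (x : String) :
    PySem.Set.contains pvSurfaces x = decide (x ∈ pvSurfNames) := by
  simp [PySem.Set.contains, show pvSurfaces = (pvSurfNames : List String) from by decide]

-- B's staged heads-then-filter pipeline picks exactly pvPick
set_option maxHeartbeats 1000000 in
theorem pv_pipeline_eq (tools : List String) :
    (pvHeads tools).filter (fun h => PySem.Set.contains pvSurfaces h)
      = tools.filterMap pvPick := by
  induction tools with
  | nil => rfl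
  | cons t tools ih =>
    simp only [pvHeads, pv_contains_eq] at ih ⊢
    by_cases hu : '_' ∈ (PySem.Str.strip t).toList
    · have hub : ((PySem.Str.strip t).toList).contains '_' = true := by simpa using hu
      have hh : (if ((PySem.Str.strip t).toList).contains '_' then
            some (String.ofList (((PySem.Str.strip t).toList).takeWhile (fun c => decide (c ≠ '_'))))
          else none)
          = some (String.ofList (((PySem.Str.strip t).toList).takeWhile (fun c => decide (c ≠ '_')))) :=
        if_pos hub
      by_cases hm : String.ofList (((PySem.Str.strip t).toList).takeWhile (fun c => decide (c ≠ '_'))) ∈ pvSurfNames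
      · have hp : pvPick t
            = some (String.ofList (((PySem.Str.strip t).toList).takeWhile (fun c => decide (c ≠ '_')))) := by
          show (if '_' ∈ (PySem.Str.strip t).toList ∧
              String.ofList (((PySem.Str.strip t).toList).takeWhile (fun c => decide (c ≠ '_'))) ∈ pvSurfNames then
              some (String.ofList (((PySem.Str.strip t).toList).takeWhile (fun c => decide (c ≠ '_'))))
            else none) = _
          exact if_pos ⟨hu, hm⟩
        simp only [List.filterMap_cons, hh, hp, List.filter_cons]
        simp only [decide_eq_true_eq]
        rw [if_pos hm]
        exact congrArg _ ih
      · have hp : pvPick t = none := by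
          show (if '_' ∈ (PySem.Str.strip t).toList ∧
              String.ofList (((PySem.Str.strip t).toList).takeWhile (fun c => decide (c ≠ '_'))) ∈ pvSurfNames then
              some (String.ofList (((PySem.Str.strip t).toList).takeWhile (fun c => decide (c ≠ '_'))))
            else none) = _
          exact if_neg (by tauto)
        simp only [List.filterMap_cons, hh, hp, List.filter_cons]
        simp only [decide_eq_true_eq]
        rw [if_neg hm]
        exact ih
    · have hub : ((PySem.Str.strip t).toList).contains '_' = false := by simpa using hu
      have hh : (if ((PySem.Str.strip t).toList).contains '_' then
            some (String.ofList (((PySem.Str.strip t).toList).takeWhile (fun c => decide (c ≠ '_'))))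
          else none) = none := by
        rw [hub]; rfl
      have hp : pvPick t = none := by
        show (if '_' ∈ (PySem.Str.strip t).toList ∧
            String.ofList (((PySem.Str.strip t).toList).takeWhile (fun c => decide (c ≠ '_'))) ∈ pvSurfNames then
            some (String.ofList (((PySem.Str.strip t).toList).takeWhile (fun c => decide (c ≠ '_'))))
          else none) = _
        exact if_neg (by tauto)
      simp only [List.filterMap_cons, hh, hp]
      exact ih

-- ===== VERDICT (by name: the statement is the Claim_ definition above) =====
theorem infer_openclaw_surfaces_py_spec : Claim_equal_infer_openclaw_surfaces_py := by
  intro raw_tools raw_surfaces _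
  unfold Spec_infer_openclaw_surfaces_py infer_openclaw_surfaces_py infer_openclaw_surfaces_py_alt
  simp only [pv_explicit_eq]
  by_cases hex : (raw_surfaces.getD []).filterMap
      (fun s => let t := PySem.Str.strip s; if t = "" then none else some t) = []
  · rw [if_neg (by simp [hex]), if_pos hex]
    rw [pv_pipeline_eq, PySem.List.dedup_eq_ofList, PySem.Set.ofList_eq_foldl,
      List.foldl_filterMap]
    apply List.foldl_ext
    intro acc t _
    rw [pv_step_eq]
    cases pvPick t <;> rfl
  · rw [if_pos (by simp [hex]), if_neg hex]
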